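-- pv_equiv track=rewrite | github.com/thx1138234/project-jenni | ingestion/eada/sports_loader.py | _make_lookup
-- ===== SOURCE A (Python) =====
-- _COL_ALIASES: dict[str, list[str]] = {
--     "unitid":               ["unitid"],
--     "sport_code":           ["SPORTSCODE"],
--     "sport_name":           ["Sports"],
--     "classification_name":  ["classification_name"],
--     "participants_men":     ["PARTIC_MEN"],
--     "participants_women":   ["PARTIC_WOMEN"],
--     "total_revenue":        ["TOTAL_REVENUE_ALL"],
--     "rev_men":              ["REV_MEN"],
--     "rev_women":            ["REV_WOMEN"],
--     "total_expenses":       ["TOTAL_EXPENSE_ALL"],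
--     "exp_men":              ["EXP_MEN"],
--     "exp_women":            ["EXP_WOMEN"],
--     "total_opexp":          ["TOTAL_OPEXP_INCLCOED"],
--     "headcoach_count_men":  ["MEN_TOTAL_HEADCOACH"],
--     "headcoach_count_women":["WOMEN_TOTAL_HDCOACH"],
-- }
--
-- def _make_lookup(raw_headers: list[str]) -> dict[str, str]:
--     """Build case-insensitive alias → actual header mapping."""
--     upper_map = {h.upper(): h for h in raw_headers}
--     result = {}
--     for field, aliases in _COL_ALIASES.items():
--         for alias in aliases:
--             if alias.upper() in upper_map:
--                 result[field] = upper_map[alias.upper()]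
--                 break
--     return result
-- ===== SOURCE B (Python) =====
-- _COL_ALIASES: dict[str, list[str]] = {
--     "unitid":               ["unitid"],
--     "sport_code":           ["SPORTSCODE"],
--     "sport_name":           ["Sports"],
--     "classification_name":  ["classification_name"],
--     "participants_men":     ["PARTIC_MEN"],
--     "participants_women":   ["PARTIC_WOMEN"],
--     "total_revenue":        ["TOTAL_REVENUE_ALL"],
--     "rev_men":              ["REV_MEN"],
--     "rev_women":            ["REV_WOMEN"],
--     "total_expenses":       ["TOTAL_EXPENSE_ALL"],
--     "exp_men":              ["EXP_MEN"],
--     "exp_women":            ["EXP_WOMEN"],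
--     "total_opexp":          ["TOTAL_OPEXP_INCLCOED"],
--     "headcoach_count_men":  ["MEN_TOTAL_HEADCOACH"],
--     "headcoach_count_women":["WOMEN_TOTAL_HDCOACH"],
-- }
--
-- # Reverse lookup: uppercase alias -> field name (built once).
-- _ALIAS_TO_FIELD = {a.upper(): f for f, aliases in _COL_ALIASES.items() for a in aliases}
--
-- def _make_lookup(raw_headers: list[str]) -> dict[str, str]:
--     """Build case-insensitive alias -> actual header mapping."""
--     found = {}
--     for h in raw_headers:
--         f = _ALIAS_TO_FIELD.get(h.upper())
--         if f is not None:
--             found[f] = h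
--     return {f: found[f] for f in _COL_ALIASES if f in found}
-- ===== Notes on version B (the rewrite author's own statement) =====
-- stated objective: alternative
-- what changed: Replaces A's header-index dict plus scan of the alias table by the transposed traversal: a constant reverse map uppercase-alias->field, one pass over raw_headers recording last match per field, then emission in canonical field order.
import Mathlib
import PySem

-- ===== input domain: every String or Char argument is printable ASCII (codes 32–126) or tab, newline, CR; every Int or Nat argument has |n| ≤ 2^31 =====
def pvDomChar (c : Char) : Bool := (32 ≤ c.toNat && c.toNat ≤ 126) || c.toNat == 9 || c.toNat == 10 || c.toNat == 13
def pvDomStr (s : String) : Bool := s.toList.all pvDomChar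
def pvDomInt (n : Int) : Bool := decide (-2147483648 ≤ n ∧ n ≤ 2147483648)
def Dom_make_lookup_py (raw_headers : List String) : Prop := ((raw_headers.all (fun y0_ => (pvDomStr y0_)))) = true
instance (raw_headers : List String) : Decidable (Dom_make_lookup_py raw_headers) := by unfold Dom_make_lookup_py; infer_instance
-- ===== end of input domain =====

-- B replaces A's header-index dict + alias-table scan by the transposed traversal
-- (constant reverse alias->field map, one pass over the headers, emit in field order);
-- objective: alternative decomposition, same cost.


-- ===== PORT A =====
-- _COL_ALIASES, shared module constant
def pvColAliases : List (String × List String) :=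
  [("unitid",               ["unitid"]),
   ("sport_code",           ["SPORTSCODE"]),
   ("sport_name",           ["Sports"]),
   ("classification_name",  ["classification_name"]),
   ("participants_men",     ["PARTIC_MEN"]),
   ("participants_women",   ["PARTIC_WOMEN"]),
   ("total_revenue",        ["TOTAL_REVENUE_ALL"]),
   ("rev_men",              ["REV_MEN"]),
   ("rev_women",            ["REV_WOMEN"]),
   ("total_expenses",       ["TOTAL_EXPENSE_ALL"]),
   ("exp_men",              ["EXP_MEN"]),
   ("exp_women",            ["EXP_WOMEN"]),
   ("total_opexp",          ["TOTAL_OPEXP_INCLCOED"]),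
   ("headcoach_count_men",  ["MEN_TOTAL_HEADCOACH"]),
   ("headcoach_count_women",["WOMEN_TOTAL_HDCOACH"])]

-- inner 'for alias in aliases: if alias.upper() in upper_map: result[field] = …; break'
def pvLoopAliases (upper_map : PySem.Dict String String)
    (result : PySem.Dict String String) (field : String) :
    List String → PySem.Dict String String
  | [] => result
  | a :: rest =>
    if upper_map.contains (PySem.Str.upper a) then
      result.insert field (upper_map.getD (PySem.Str.upper a) "")
    else pvLoopAliases upper_map result field rest

def make_lookup_py (raw_headers : List String) : List (String × String) :=
  let upper_map := raw_headers.foldl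
    (fun d h => d.insert (PySem.Str.upper h) h) PySem.Dict.empty
  let result := pvColAliases.foldl
    (fun r p => pvLoopAliases upper_map r p.1 p.2) PySem.Dict.empty
  result.items

-- ===== PORT B =====
-- _ALIAS_TO_FIELD = {a.upper(): f for f, aliases in _COL_ALIASES.items() for a in aliases}
def pvAliasToField : PySem.Dict String String :=
  PySem.Dict.ofList (pvColAliases.flatMap (fun p => p.2.map (fun a => (PySem.Str.upper a, p.1))))

def make_lookup_py_alt (raw_headers : List String) : List (String × String) :=
  let found := raw_headers.foldl
    (fun d h =>
      match pvAliasToField.get? (PySem.Str.upper h) with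
      | some f => d.insert f h
      | none => d) PySem.Dict.empty
  let result := pvColAliases.foldl
    (fun r p => if found.contains p.1 then r.insert p.1 (found.getD p.1 "") else r)
    PySem.Dict.empty
  result.items

-- ===== PRECONDITION & SPEC =====
def Spec_make_lookup_py (raw_headers : List String) (out : List (String × String)) : Prop := out = make_lookup_py_alt raw_headers
instance (raw_headers : List String) (out : List (String × String)) : Decidable (Spec_make_lookup_py raw_headers out) := by unfold Spec_make_lookup_py; infer_instance

-- ===== CLAIM (what is proved, stated in full; the proofs are below) =====
def Claim_equal_make_lookup_py : Prop := ∀ (raw_headers : List String), Dom_make_lookup_py raw_headers → Spec_make_lookup_py raw_headers (make_lookup_py raw_headers)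

-- ===== LEMMAS AND PROOFS =====

-- the alias table's shape: each field has exactly one alias, present in the reverse map
theorem pv_table_shape : ∀ p ∈ pvColAliases,
    ∃ a, p.2 = [a] ∧ (PySem.Str.upper a, p.1) ∈ pvAliasToField.items := by
  intro p hp
  fin_cases hp <;> exact ⟨_, rfl, by decide⟩

theorem pv_keys_nodup : pvAliasToField.keys.Nodup := by decide

theorem pv_values_nodup : (pvAliasToField.items.map Prod.snd).Nodup := by decide

-- the two header loops stay in lockstep: found[f] = upper_map[A] for every reverse pair (A, f)
theorem pv_inv : ∀ (hs : List String) (d u : PySem.Dict String String),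
    (∀ f A : String, (A, f) ∈ pvAliasToField.items → d.get? f = u.get? A) →
    ∀ f A : String, (A, f) ∈ pvAliasToField.items →
    (hs.foldl (fun d h =>
      match pvAliasToField.get? (PySem.Str.upper h) with
      | some g => d.insert g h
      | none => d) d).get? f
    = (hs.foldl (fun u h => u.insert (PySem.Str.upper h) h) u).get? A := by
  intro hs
  induction hs with
  | nil => intro d u hinv f A hmem; exact hinv f A hmem
  | cons h rest ih =>
    intro d u hinv f A hmem
    simp only [List.foldl]
    apply ih
    · intro f' A' hmem'
      rcases hg : pvAliasToField.get? (PySem.Str.upper h) with _ | g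
      · -- no field for this header
        have hne : A' ≠ PySem.Str.upper h := by
          intro he
          have := PySem.Dict.get?_of_mem_items _ hmem' pv_keys_nodup
          rw [he, hg] at this; cases this
        show d.get? f' = (u.insert (PySem.Str.upper h) h).get? A'
        rw [PySem.Dict.get?_insert_of_ne _ _ hne]
        exact hinv f' A' hmem'
      · show (d.insert g h).get? f' = (u.insert (PySem.Str.upper h) h).get? A'
        by_cases hA : A' = PySem.Str.upper h
        · -- this header hits alias A'; both sides record h
          have hf' : g = f' := by
            have := PySem.Dict.get?_of_mem_items _ hmem' pv_keys_nodup
            rw [hA, hg] at this; exact Option.some.inj this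
          subst hf'; subst hA
          rw [PySem.Dict.get?_insert_self, PySem.Dict.get?_insert_self]
        · -- different alias: f' ≠ g by uniqueness of fields among the values
          have hgmem : (PySem.Str.upper h, g) ∈ pvAliasToField.items :=
            PySem.Dict.mem_items_of_get?_eq_some _ hg
          have hfg : f' ≠ g := by
            intro he
            subst he
            exact hA (congrArg Prod.fst
              (List.inj_on_of_nodup_map pv_values_nodup hmem' hgmem rfl))
          rw [PySem.Dict.get?_insert_of_ne _ _ hfg, PySem.Dict.get?_insert_of_ne _ _ hA]
          exact hinv f' A' hmem'
    · exact hmem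

-- given the lockstep lookups, the two table folds build the same result dict
theorem pv_fold_eq (u fnd : PySem.Dict String String) :
    ∀ (table : List (String × List String)),
    (∀ p ∈ table, ∃ a, p.2 = [a] ∧ fnd.get? p.1 = u.get? (PySem.Str.upper a)) →
    ∀ r : PySem.Dict String String,
    table.foldl (fun r p => pvLoopAliases u r p.1 p.2) r
    = table.foldl (fun r p => if fnd.contains p.1 then r.insert p.1 (fnd.getD p.1 "") else r) r := by
  intro table
  induction table with
  | nil => intro _ r; rfl
  | cons p rest ih =>
    intro hshape r
    obtain ⟨a, ha, hget⟩ := hshape p (List.mem_cons_self)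
    simp only [List.foldl, ha]
    have hc : u.contains (PySem.Str.upper a) = fnd.contains p.1 := by
      rw [PySem.Dict.contains_eq_isSome_get?, PySem.Dict.contains_eq_isSome_get?, hget]
    have hd : u.getD (PySem.Str.upper a) "" = fnd.getD p.1 "" := by
      rw [PySem.Dict.getD_eq_get?_getD, PySem.Dict.getD_eq_get?_getD, hget]
    rw [show pvLoopAliases u r p.1 [a]
        = if fnd.contains p.1 then r.insert p.1 (fnd.getD p.1 "") else r by
      simp only [pvLoopAliases, hc, hd]]
    exact ih (fun q hq => hshape q (List.mem_cons_of_mem _ hq)) _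

-- ===== VERDICT (by name: the statement is the Claim_ definition above) =====
theorem make_lookup_py_spec : Claim_equal_make_lookup_py := by
  intro raw_headers _
  show (pvColAliases.foldl
      (fun r p => pvLoopAliases
        (raw_headers.foldl (fun d h => d.insert (PySem.Str.upper h) h) PySem.Dict.empty)
        r p.1 p.2) PySem.Dict.empty).items
    = (pvColAliases.foldl
      (fun r p =>
        if (raw_headers.foldl (fun d h =>
              match pvAliasToField.get? (PySem.Str.upper h) with
              | some f => d.insert f h
              | none => d) PySem.Dict.empty).contains p.1 then
          r.insert p.1 ((raw_headers.foldl (fun d h =>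
              match pvAliasToField.get? (PySem.Str.upper h) with
              | some f => d.insert f h
              | none => d) PySem.Dict.empty).getD p.1 "")
        else r) PySem.Dict.empty).items
  congr 1
  refine pv_fold_eq _ _ _ (fun p hp => ?_) _
  obtain ⟨a, ha, hmem⟩ := pv_table_shape p hp
  refine ⟨a, ha, ?_⟩
  exact pv_inv raw_headers _ _ (by simp [PySem.Dict.get?_empty]) p.1 (PySem.Str.upper a) hmem
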